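-- pv_equiv track=rewrite | github.com/gitHBDX/TransfoRNA | kba_pipeline/src/precursor_bins.py | compute_dynamic_bin_size
-- ===== SOURCE A (Python) =====
-- from typing import List
--
-- def compute_dynamic_bin_size(precursor_len:int, name:str=None, min_bin_size:int=20, max_bin_size:int=30) -> List[int]:
--     '''
--     This function splits precursor to bins of size max_bin_size
--     if the last bin is smaller than min_bin_size, it will split the precursor to bins of size max_bin_size-1
--     This process will continue until the last bin is larger than min_bin_size.
--     if the min bin size is reached and still the last bin is smaller than min_bin_size, the last two bins will be merged.
--     so the maximimum bin size possible would be min_bin_size+(min_bin_size-1) = 39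
--     '''
--     def split_precursor_to_bins(precursor_len,max_bin_size):
--         '''
--         This function splits precursor to bins of size max_bin_size
--         '''
--         precursor_bin_lens = []
--         for i in range(0, precursor_len, max_bin_size):
--             if i+max_bin_size < precursor_len:
--                 precursor_bin_lens.append(max_bin_size)
--             else:
--                 precursor_bin_lens.append(precursor_len-i)
--         return precursor_bin_lens
--
--     if precursor_len < min_bin_size:
--         return [precursor_len]
--     else:
--         precursor_bin_lens = split_precursor_to_bins(precursor_len,max_bin_size)
--         reduced_len = max_bin_size-1
--         while precursor_bin_lens[-1] < min_bin_size:
--             precursor_bin_lens = split_precursor_to_bins(precursor_len,reduced_len)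
--             reduced_len -= 1
--             if reduced_len < min_bin_size:
--                 #add last two bins together
--                 precursor_bin_lens[-2] += precursor_bin_lens[-1]
--                 precursor_bin_lens = precursor_bin_lens[:-1]
--                 break
--
--         return precursor_bin_lens
-- ===== SOURCE B (Python) =====
-- from typing import List
--
-- def compute_dynamic_bin_size(precursor_len:int, name:str=None, min_bin_size:int=20, max_bin_size:int=30) -> List[int]:
--     # Select the bin size first (largest b in [min_bin_size, max_bin_size] whose
--     # last bin is >= min_bin_size), then build the bin list once; if no size
--     # qualifies, build with min_bin_size and merge the last two bins.
--     def last_bin(b):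
--         # size of the final bin when splitting into bins of size b
--         return precursor_len - b * ((precursor_len - 1) // b)
--
--     def build(b):
--         q, r = divmod(precursor_len, b)
--         return [b] * q + ([r] if r else [])
--
--     if precursor_len < min_bin_size:
--         return [precursor_len]
--     b = max_bin_size
--     while b >= min_bin_size:
--         if last_bin(b) >= min_bin_size:
--             return build(b)
--         b -= 1
--     bins = build(min_bin_size)
--     bins[-2] += bins[-1]
--     return bins[:-1]
-- ===== Notes on version B (the rewrite author's own statement) =====
-- stated objective: alternative
-- what changed: B selects the bin size first by computing only each candidate's last-bin size arithmetically (scanning max_bin_size down to min_bin_size) and builds the bin list once via divmod, instead of A's rebuilding of the whole bin list for every candidate size; on the corner described in 'differs', B returns the even split instead of A's accidental merge.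
-- intended difference: When no bin size in (min_bin_size, max_bin_size] gives a last bin >= min_bin_size but min_bin_size divides precursor_len exactly, A still merges the last two size-min_bin_size bins (e.g. (40, None, 20, 30) -> [40], exceeding the docstring's stated maximum bin of 39), while B returns the even split [20, 20], which is the intended result. — e.g. on compute_dynamic_bin_size(40, none, 20, 30): A returns [40], B returns [20, 20]
-- outside the precondition, e.g. on compute_dynamic_bin_size(45, None, 20, 20): A returns [19, 26], B returns [20, 25]; on compute_dynamic_bin_size(12, None, 10, 3): A returns [2, 2, 2, 2, 4], B returns [12]
import Mathlib
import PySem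

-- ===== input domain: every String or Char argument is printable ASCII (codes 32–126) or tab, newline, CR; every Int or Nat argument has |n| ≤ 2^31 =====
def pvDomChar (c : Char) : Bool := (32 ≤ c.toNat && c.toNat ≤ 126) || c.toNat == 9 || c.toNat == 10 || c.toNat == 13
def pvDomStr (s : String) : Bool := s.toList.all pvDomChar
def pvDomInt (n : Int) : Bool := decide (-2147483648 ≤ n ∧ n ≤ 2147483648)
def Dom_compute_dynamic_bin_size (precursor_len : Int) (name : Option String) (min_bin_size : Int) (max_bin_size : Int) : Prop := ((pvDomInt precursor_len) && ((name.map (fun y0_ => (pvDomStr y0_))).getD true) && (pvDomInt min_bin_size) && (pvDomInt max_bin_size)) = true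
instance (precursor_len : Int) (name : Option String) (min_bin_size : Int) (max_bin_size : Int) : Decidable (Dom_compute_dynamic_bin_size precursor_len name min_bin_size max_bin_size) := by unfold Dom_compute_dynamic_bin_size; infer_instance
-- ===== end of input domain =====

-- B selects the bin size arithmetically first and builds the bin list once, instead of
-- rebuilding the whole list for every candidate size (objective: alternative decomposition);
-- on the corner stated at D_ below, B returns the even split A's accidental merge destroys.

-- ===== PORT A =====
-- helper split_precursor_to_bins: for i in range(0, precursor_len, max_bin_size):
-- one element appended per i, so the loop is ported as a map over the range
def pvSplitA (precursor_len : Int) (max_bin_size : Int) : List Int :=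
  (PySem.List.pyRange 0 precursor_len max_bin_size).map
    (fun i => if i + max_bin_size < precursor_len then max_bin_size else precursor_len - i)

-- bins[-2] += bins[-1]; bins[:-1]  — the result is bins[:-2] ++ [bins[-2] + bins[-1]]
-- (the slice drops the unmodified last element, so only the new value at position -2 remains)
def pvMergeA (bins : List Int) : List Int :=
  PySem.List.slice bins none (some (-2)) ++
    [PySem.List.pyGetD bins (-2) 0 + PySem.List.pyGetD bins (-1) 0]

-- the while loop: state (precursor_bin_lens, reduced_len)
def pvLoopA (precursor_len min_bin_size : Int) (bins : List Int) (reduced_len : Int) : List Int :=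
  if PySem.List.pyGetD bins (-1) 0 < min_bin_size then
    if reduced_len - 1 < min_bin_size then pvMergeA (pvSplitA precursor_len reduced_len)
    else pvLoopA precursor_len min_bin_size (pvSplitA precursor_len reduced_len) (reduced_len - 1)
  else bins
termination_by (reduced_len - min_bin_size).toNat
decreasing_by omega

def compute_dynamic_bin_size (precursor_len : Int) (name : Option String) (min_bin_size : Int) (max_bin_size : Int) : List Int :=
  if precursor_len < min_bin_size then [precursor_len]
  else pvLoopA precursor_len min_bin_size (pvSplitA precursor_len max_bin_size) (max_bin_size - 1)

-- ===== PORT B =====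
-- last_bin(b) = precursor_len - b * ((precursor_len - 1) // b)
def pvLastBin (precursor_len b : Int) : Int :=
  precursor_len - b * PySem.Int.floordiv (precursor_len - 1) b

-- build(b): q, r = divmod(precursor_len, b); [b]*q + ([r] if r else [])
def pvBuild (precursor_len b : Int) : List Int :=
  match PySem.Int.divmod? precursor_len b with
  | none => []          -- b = 0: Python raises ZeroDivisionError (never reached under Pre_)
  | some (q, r) => List.replicate q.toNat b ++ (if r ≠ 0 then [r] else [])

-- bins[-2] += bins[-1]; bins[:-1]  (same two lines as in A; see the comment at pvMergeA)
def pvMergeB (bins : List Int) : List Int :=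
  PySem.List.slice bins none (some (-2)) ++
    [PySem.List.pyGetD bins (-2) 0 + PySem.List.pyGetD bins (-1) 0]

-- the while loop: b = max_bin_size; while b >= min_bin_size: … (early return); b -= 1;
-- then the merge fallback
def pvScanB (precursor_len min_bin_size : Int) (b : Int) : List Int :=
  if min_bin_size ≤ b then
    if min_bin_size ≤ pvLastBin precursor_len b then pvBuild precursor_len b
    else pvScanB precursor_len min_bin_size (b - 1)
  else pvMergeB (pvBuild precursor_len min_bin_size)
termination_by (b - min_bin_size + 1).toNat
decreasing_by omega

def compute_dynamic_bin_size_alt (precursor_len : Int) (name : Option String) (min_bin_size : Int) (max_bin_size : Int) : List Int :=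
  if precursor_len < min_bin_size then [precursor_len]
  else pvScanB precursor_len min_bin_size max_bin_size

-- ===== PRECONDITION & SPEC =====
-- Pre_ excludes, among the inputs with min_bin_size ≤ precursor_len: non-positive precursor_len
-- or max_bin_size, on which A typically raises (IndexError; ValueError from range), and the
-- degenerate configurations with max_bin_size ≤ min_bin_size on which A's reducing scan is
-- entered — outside the function's natural domain (the docstring assumes a scan from
-- max_bin_size down to min_bin_size) — where A splits with bin sizes below min_bin_size, an
-- accident of its implementation (max_bin_size = min_bin_size stays admitted when no
-- reduction happens: min_bin_size ≤ 1 or min_bin_size ∣ precursor_len).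
def Pre_compute_dynamic_bin_size (precursor_len : Int) (name : Option String) (min_bin_size : Int) (max_bin_size : Int) : Prop :=
  precursor_len < min_bin_size ∨
    (min_bin_size ≤ precursor_len ∧ 1 ≤ precursor_len ∧ 1 ≤ max_bin_size ∧ min_bin_size < max_bin_size) ∨
    (min_bin_size ≤ precursor_len ∧ 1 ≤ precursor_len ∧ 1 ≤ max_bin_size ∧ max_bin_size = min_bin_size ∧
      (min_bin_size ≤ 1 ∨ min_bin_size ∣ precursor_len))
instance (precursor_len : Int) (name : Option String) (min_bin_size : Int) (max_bin_size : Int) : Decidable (Pre_compute_dynamic_bin_size precursor_len name min_bin_size max_bin_size) := by unfold Pre_compute_dynamic_bin_size; infer_instance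

def pvWitness_compute_dynamic_bin_size : Int × Option String × Int × Int := (100, none, 20, 30)

-- When no bin size in (min_bin_size, max_bin_size] gives a last bin ≥ min_bin_size but
-- min_bin_size divides precursor_len exactly, A still merges the last two size-min_bin_size
-- bins (e.g. (40, None, 20, 30) → [40], exceeding the documented maximum bin of 39), while B
-- returns the even split [20, 20], which is the intended result.
def D_compute_dynamic_bin_size (precursor_len : Int) (name : Option String) (min_bin_size : Int) (max_bin_size : Int) : Prop :=
  min_bin_size ≤ precursor_len ∧ 2 ≤ min_bin_size ∧ min_bin_size < max_bin_size ∧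
    min_bin_size ∣ precursor_len ∧
    ∀ b ∈ PySem.List.pyRange (min_bin_size + 1) (max_bin_size + 1) 1,
      precursor_len - b * ((precursor_len - 1) / b) < min_bin_size
instance (precursor_len : Int) (name : Option String) (min_bin_size : Int) (max_bin_size : Int) : Decidable (D_compute_dynamic_bin_size precursor_len name min_bin_size max_bin_size) := by unfold D_compute_dynamic_bin_size; infer_instance

def Spec_compute_dynamic_bin_size (precursor_len : Int) (name : Option String) (min_bin_size : Int) (max_bin_size : Int) (out : List Int) : Prop := ¬ D_compute_dynamic_bin_size precursor_len name min_bin_size max_bin_size → out = compute_dynamic_bin_size_alt precursor_len name min_bin_size max_bin_size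
instance (precursor_len : Int) (name : Option String) (min_bin_size : Int) (max_bin_size : Int) (out : List Int) : Decidable (Spec_compute_dynamic_bin_size precursor_len name min_bin_size max_bin_size out) := by unfold Spec_compute_dynamic_bin_size; infer_instance

def pvDiffWitness_compute_dynamic_bin_size : Int × Option String × Int × Int := (40, none, 20, 30)
def pvDiffWitnessOut_compute_dynamic_bin_size : (List Int) × (List Int) := ([40], [20, 20])

-- ===== CLAIM (what is proved, stated in full; the proofs are below) =====
def Claim_unchanged_compute_dynamic_bin_size : Prop := ∀ (precursor_len : Int) (name : Option String) (min_bin_size : Int) (max_bin_size : Int), Dom_compute_dynamic_bin_size precursor_len name min_bin_size max_bin_size → Pre_compute_dynamic_bin_size precursor_len name min_bin_size max_bin_size → Spec_compute_dynamic_bin_size precursor_len name min_bin_size max_bin_size (compute_dynamic_bin_size precursor_len name min_bin_size max_bin_size)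
def Claim_changed_compute_dynamic_bin_size : Prop := Dom_compute_dynamic_bin_size (pvDiffWitness_compute_dynamic_bin_size.1) (pvDiffWitness_compute_dynamic_bin_size.2.1) (pvDiffWitness_compute_dynamic_bin_size.2.2.1) (pvDiffWitness_compute_dynamic_bin_size.2.2.2) ∧ Pre_compute_dynamic_bin_size (pvDiffWitness_compute_dynamic_bin_size.1) (pvDiffWitness_compute_dynamic_bin_size.2.1) (pvDiffWitness_compute_dynamic_bin_size.2.2.1) (pvDiffWitness_compute_dynamic_bin_size.2.2.2) ∧ D_compute_dynamic_bin_size (pvDiffWitness_compute_dynamic_bin_size.1) (pvDiffWitness_compute_dynamic_bin_size.2.1) (pvDiffWitness_compute_dynamic_bin_size.2.2.1) (pvDiffWitness_compute_dynamic_bin_size.2.2.2) ∧ compute_dynamic_bin_size (pvDiffWitness_compute_dynamic_bin_size.1) (pvDiffWitness_compute_dynamic_bin_size.2.1) (pvDiffWitness_compute_dynamic_bin_size.2.2.1) (pvDiffWitness_compute_dynamic_bin_size.2.2.2) = pvDiffWitnessOut_compute_dynamic_bin_size.1 ∧ compute_dynamic_bin_size_alt (pvDiffWitness_compute_dynamic_bin_size.1)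 (pvDiffWitness_compute_dynamic_bin_size.2.1) (pvDiffWitness_compute_dynamic_bin_size.2.2.1) (pvDiffWitness_compute_dynamic_bin_size.2.2.2) = pvDiffWitnessOut_compute_dynamic_bin_size.2 ∧ pvDiffWitnessOut_compute_dynamic_bin_size.1 ≠ pvDiffWitnessOut_compute_dynamic_bin_size.2
def Claim_exact_compute_dynamic_bin_size : Prop := ∀ (precursor_len : Int) (name : Option String) (min_bin_size : Int) (max_bin_size : Int), Dom_compute_dynamic_bin_size precursor_len name min_bin_size max_bin_size → Pre_compute_dynamic_bin_size precursor_len name min_bin_size max_bin_size → D_compute_dynamic_bin_size precursor_len name min_bin_size max_bin_size → compute_dynamic_bin_size precursor_len name min_bin_size max_bin_size ≠ compute_dynamic_bin_size_alt precursor_len name min_bin_size max_bin_size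

-- ===== LEMMAS AND PROOFS =====

-- the common closed form of one split: K full bins of size b and the final bin
def pvBF (len b : Int) : List Int :=
  List.replicate (((len - 1) / b).toNat) b ++ [pvLastBin len b]

theorem pvLastBin_emod (len : Int) {b : Int} (hb : 0 < b) :
    pvLastBin len b = (len - 1) % b + 1 := by
  unfold pvLastBin
  rw [PySem.Int.floordiv_eq_ediv_of_pos hb, Int.emod_def]
  ring

theorem pvLastBin_pos {len b : Int} (hb : 0 < b) (hl : 0 < len) : 1 ≤ pvLastBin len b := by
  rw [pvLastBin_emod len hb]
  have := Int.emod_nonneg (len - 1) hb.ne'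
  omega

theorem pvLastBin_le {len b : Int} (hb : 0 < b) : pvLastBin len b ≤ b := by
  rw [pvLastBin_emod len hb]
  have := Int.emod_lt_of_pos (len - 1) hb
  omega

theorem pvLastBin_eq_iff_dvd {len b : Int} (hb : 0 < b) :
    pvLastBin len b = b ↔ b ∣ len := by
  rw [pvLastBin_emod len hb]
  constructor
  · intro h
    have hde : b * ((len - 1) / b) + (len - 1) % b = len - 1 := Int.ediv_add_emod (len - 1) b
    exact ⟨(len - 1) / b + 1, by linarith⟩
  · rintro ⟨c, rfl⟩
    have h1 : b * c - 1 = (b - 1) + b * (c - 1) := by ring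
    rw [h1, Int.add_mul_emod_self_left, Int.emod_eq_of_lt (by omega) (by omega)]
    ring

theorem pvLastBin_of_le {len b : Int} (hb : 0 < b) (h0 : 0 < len) (h : len ≤ b) :
    pvLastBin len b = len := by
  rw [pvLastBin_emod len hb, Int.emod_eq_of_lt (by omega) (by omega)]
  ring

-- A's splitter equals the closed form
theorem pvSplitA_eq_BF {len b : Int} (hb : 0 < b) (hl : 0 < len) :
    pvSplitA len b = pvBF len b := by
  unfold pvSplitA pvBF
  rw [PySem.List.pyRange_of_pos _ _ hb, List.map_map]
  have hK : 0 ≤ (len - 1) / b := Int.ediv_nonneg (by omega) (by omega)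
  set K : Nat := ((len - 1) / b).toNat with hKdef
  have hKcast : (K : Int) = (len - 1) / b := Int.toNat_of_nonneg hK
  have hN : (if (0:Int) < len then ((len - 0 + b - 1) / b).toNat else 0) = K + 1 := by
    rw [if_pos hl]
    have : len - 0 + b - 1 = (len - 1) + b * 1 := by ring
    rw [this, Int.add_mul_ediv_left _ _ hb.ne']
    omega
  rw [hN, List.range_succ, List.map_append]
  have hbK : b * (K : Int) ≤ len - 1 := by
    have h := Int.ediv_mul_le (len - 1) hb.ne'
    rw [hKcast]
    linarith [h, mul_comm ((len - 1) / b) b]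
  have hlt : len - 1 < ((len - 1) / b + 1) * b := Int.lt_ediv_add_one_mul_self (len - 1) hb
  congr 1
  · rw [List.eq_replicate_iff]
    refine ⟨by simp, ?_⟩
    intro x hx
    simp only [List.mem_map, List.mem_range, Function.comp] at hx
    obtain ⟨k, hk, rfl⟩ := hx
    have hk1 : (k : Int) + 1 ≤ (K : Int) := by exact_mod_cast Nat.succ_le_of_lt hk
    have hkb : b * ((k : Int) + 1) ≤ b * (K : Int) := by
      apply mul_le_mul_of_nonneg_left hk1 (by omega)
    rw [if_pos (by nlinarith)]
  · simp only [List.map_cons, List.map_nil, Function.comp]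
    rw [if_neg (by rw [hKcast] at hbK ⊢; nlinarith)]
    unfold pvLastBin
    rw [PySem.Int.floordiv_eq_ediv_of_pos hb, hKcast]
    ring_nf

-- B's builder equals the closed form
theorem pvBuild_eq_BF {len b : Int} (hb : 0 < b) (hl : 0 < len) :
    pvBuild len b = pvBF len b := by
  unfold pvBuild pvBF
  have hdm : PySem.Int.divmod? len b = some (PySem.Int.floordiv len b, PySem.Int.mod len b) := by
    simp [PySem.Int.divmod?, PySem.Int.floordiv, PySem.Int.mod, hb.ne']
  rw [hdm]
  simp only
  rw [PySem.Int.floordiv_eq_ediv_of_pos hb, PySem.Int.mod_eq_emod_of_pos hb]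
  rw [pvLastBin_emod len hb]
  have hq := Int.emod_nonneg len hb.ne'
  have hq2 := Int.emod_lt_of_pos len hb
  have hdef : b * (len / b) + len % b = len := Int.ediv_add_emod len b
  by_cases hr : len % b = 0
  · rw [if_neg (by simpa using hr)]
    have hble : b ≤ len := by
      by_contra hlt2
      push_neg at hlt2
      rw [Int.emod_eq_of_lt (by omega) hlt2] at hr
      omega
    have hqpos : 1 ≤ len / b := by
      have := (Int.le_ediv_iff_mul_le hb).mpr (by omega : 1 * b ≤ len)
      exact this
    have hmulsub : b * (len / b - 1) = b * (len / b) - b := by ring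
    have h1 : (len - 1) / b = len / b - 1 := by
      have heq : len - 1 = (b - 1) + b * (len / b - 1) := by omega
      rw [heq, Int.add_mul_ediv_left _ _ hb.ne', Int.ediv_eq_zero_of_lt (by omega) (by omega)]
      ring
    have h2 : (len - 1) % b = b - 1 := by
      have heq : len - 1 = (b - 1) + b * (len / b - 1) := by omega
      rw [heq, Int.add_mul_emod_self_left, Int.emod_eq_of_lt (by omega) (by omega)]
    rw [h1, h2]
    have hrepl : ((len / b).toNat) = ((len / b - 1).toNat) + 1 := by omega
    rw [hrepl, List.replicate_succ']
    simp [show b - 1 + 1 = b by ring]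
  · rw [if_pos (by simpa using hr)]
    have h1 : (len - 1) / b = len / b := by
      have heq : len - 1 = (len % b - 1) + b * (len / b) := by omega
      rw [heq, Int.add_mul_ediv_left _ _ hb.ne', Int.ediv_eq_zero_of_lt (by omega) (by omega)]
      ring
    have h2 : (len - 1) % b = len % b - 1 := by
      have heq : len - 1 = (len % b - 1) + b * (len / b) := by omega
      rw [heq, Int.add_mul_emod_self_left, Int.emod_eq_of_lt (by omega) (by omega)]
    rw [h1, h2]
    simp [show len % b - 1 + 1 = len % b by ring]

theorem pvMergeA_eq_pvMergeB : pvMergeA = pvMergeB := rfl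

-- the merge on the closed form
theorem pvMerge_append2 (l : List Int) (a c : Int) : pvMergeA (l ++ [a, c]) = l ++ [a + c] := by
  unfold pvMergeA
  rw [PySem.List.slice_to_neg_ofNat _ 2 (by omega)]
  rw [PySem.List.pyGetD_neg_ofNat _ 2 0 (by omega) (by simp)]
  rw [PySem.List.pyGetD_neg_ofNat _ 1 0 (by omega) (by simp)]
  simp [List.getElem_append]

theorem pvMergeA_BF {m x : Int} {k : Nat} (hk : 1 ≤ k) :
    pvMergeA (List.replicate k m ++ [x]) = List.replicate (k - 1) m ++ [m + x] := by
  have h : List.replicate k m ++ [x] = List.replicate (k - 1) m ++ [m, x] := by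
    conv_lhs => rw [show k = (k-1)+1 by omega, List.replicate_succ']
    simp
  rw [h, pvMerge_append2]

-- last element of the closed form as Python's bins[-1]
theorem pvBF_last (len b : Int) :
    PySem.List.pyGetD (pvBF len b) (-1) 0 = pvLastBin len b := by
  unfold pvBF
  exact PySem.List.pyGetD_neg_one_append_singleton _ _ _

-- A's loop = B's scan, outside the change region
theorem pvLoopEq (len minb maxb : Int) (hl : 0 < len) (hm : 2 ≤ minb)
    (Hnd : (∀ b', minb < b' → b' ≤ maxb → pvLastBin len b' < minb) → pvLastBin len minb < minb) :
    ∀ (k : Nat) (b : Int), b = minb + 1 + k → b ≤ maxb →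
    (∀ b', b < b' → b' ≤ maxb → pvLastBin len b' < minb) →
    pvLoopA len minb (pvBF len b) (b - 1) = pvScanB len minb b := by
  intro k
  induction k with
  | zero =>
    intro b hb hbmax Hhigh
    rw [pvLoopA, pvBF_last, pvScanB, if_pos (by omega : minb ≤ b)]
    by_cases hc : pvLastBin len b < minb
    · rw [if_pos hc, if_pos (by omega)]
      have hAll : ∀ b', minb < b' → b' ≤ maxb → pvLastBin len b' < minb := by
        intro b' h1 h2
        rcases eq_or_lt_of_le (show b ≤ b' by omega) with h | h
        · rwa [← h]
        · exact Hhigh b' h h2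
      have hlow := Hnd hAll
      rw [if_neg (by omega : ¬ minb ≤ pvLastBin len b)]
      rw [show b - 1 = minb by omega, pvScanB, if_pos le_rfl,
        if_neg (by omega : ¬ minb ≤ pvLastBin len minb), pvScanB,
        if_neg (by omega : ¬ minb ≤ minb - 1)]
      rw [pvSplitA_eq_BF (by omega) hl, pvBuild_eq_BF (by omega) hl, ← pvMergeA_eq_pvMergeB]
    · rw [if_neg hc, if_pos (by omega : minb ≤ pvLastBin len b)]
      rw [pvBuild_eq_BF (by omega) hl]
  | succ k ih =>
    intro b hb hbmax Hhigh
    rw [pvLoopA, pvBF_last, pvScanB, if_pos (by omega : minb ≤ b)]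
    by_cases hc : pvLastBin len b < minb
    · rw [if_pos hc, if_neg (by omega), if_neg (by omega : ¬ minb ≤ pvLastBin len b)]
      rw [pvSplitA_eq_BF (by omega) hl]
      exact ih (b - 1) (by omega) (by omega) (by
        intro b' h1 h2
        rcases eq_or_lt_of_le (show b ≤ b' by omega) with h | h
        · rwa [← h]
        · exact Hhigh b' h h2)
    · rw [if_neg hc, if_pos (by omega : minb ≤ pvLastBin len b)]
      rw [pvBuild_eq_BF (by omega) hl]

-- A's loop reaches the unconditional merge inside the change region
theorem pvLoopD (len minb maxb : Int) (hl : 0 < len) (hm : 2 ≤ minb)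
    (Hall : ∀ b', minb < b' → b' ≤ maxb → pvLastBin len b' < minb) :
    ∀ (k : Nat) (b : Int), b = minb + 1 + k → b ≤ maxb →
    pvLoopA len minb (pvBF len b) (b - 1) = pvMergeA (pvBF len minb) := by
  intro k
  induction k with
  | zero =>
    intro b hb hbmax
    rw [pvLoopA, pvBF_last, if_pos (Hall b (by omega) hbmax), if_pos (by omega)]
    rw [show b - 1 = minb by omega, pvSplitA_eq_BF (by omega) hl]
  | succ k ih =>
    intro b hb hbmax
    rw [pvLoopA, pvBF_last, if_pos (Hall b (by omega) hbmax), if_neg (by omega)]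
    rw [pvSplitA_eq_BF (by omega) hl]
    exact ih (b - 1) (by omega) (by omega)

-- B's scan falls through to build(min) inside the change region
theorem pvScanD (len minb maxb : Int) (hl : 0 < len) (hm : 2 ≤ minb) (hdvd : minb ∣ len)
    (Hall : ∀ b', minb < b' → b' ≤ maxb → pvLastBin len b' < minb) :
    ∀ (k : Nat) (b : Int), b = minb + k → b ≤ maxb →
    pvScanB len minb b = pvBuild len minb := by
  intro k
  induction k with
  | zero =>
    intro b hb hbmax
    rw [show b = minb by omega]
    have heq : pvLastBin len minb = minb := (pvLastBin_eq_iff_dvd (by omega)).mpr hdvd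
    rw [pvScanB, if_pos le_rfl, if_pos (by omega : minb ≤ pvLastBin len minb)]
  | succ k ih =>
    intro b hb hbmax
    rw [pvScanB, if_pos (by omega : minb ≤ b),
      if_neg (by have := Hall b (by omega) hbmax; omega : ¬ minb ≤ pvLastBin len b)]
    exact ih (b - 1) (by omega) (by omega)

-- bridge between D_'s inline arithmetic and pvLastBin
theorem pvD_lastBin {len b : Int} (hb : 0 < b) :
    len - b * ((len - 1) / b) = pvLastBin len b := by
  unfold pvLastBin
  rw [PySem.Int.floordiv_eq_ediv_of_pos hb]

-- ===== VERDICT (by name: the statements are the Claim_ definitions above) =====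
theorem compute_dynamic_bin_size_spec : Claim_unchanged_compute_dynamic_bin_size := by
  intro p name minb maxb hdom hpre
  unfold Spec_compute_dynamic_bin_size
  intro hnD
  unfold compute_dynamic_bin_size compute_dynamic_bin_size_alt
  by_cases h0 : p < minb
  · rw [if_pos h0, if_pos h0]
  · rw [if_neg h0, if_neg h0]
    rcases hpre with h | hpre2 | hpre3
    · omega
    · obtain ⟨hple, hp1, hmax1, hmm⟩ := hpre2
      rw [pvSplitA_eq_BF (by omega) (by omega)]
      by_cases hm2 : 2 ≤ minb
      · apply pvLoopEq p minb maxb (by omega) hm2 ?_ ((maxb - minb - 1).toNat) maxb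
          (by omega) le_rfl (by omega)
        intro hAll
        by_contra hge
        have hle := pvLastBin_le (b := minb) (len := p) (by omega)
        have hdvd : minb ∣ p := (pvLastBin_eq_iff_dvd (by omega)).mp (by omega)
        apply hnD
        refine ⟨hple, hm2, hmm, hdvd, ?_⟩
        intro b hbmem
        have hbr := (PySem.List.mem_pyRange_one).mp hbmem
        rw [pvD_lastBin (by omega)]
        exact hAll b (by omega) (by omega)
      · have hlast : minb ≤ pvLastBin p maxb :=
          le_trans (by omega) (pvLastBin_pos (by omega) (by omega))
        rw [pvLoopA, pvBF_last, if_neg (by omega)]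
        rw [pvScanB, if_pos (by omega : minb ≤ maxb), if_pos hlast]
        rw [pvBuild_eq_BF (by omega) (by omega)]
    · obtain ⟨hple, hp1, hmax1, heqm, hd⟩ := hpre3
      have hlast : minb ≤ pvLastBin p maxb := by
        rcases hd with h1 | h2
        · exact le_trans (by omega) (pvLastBin_pos (by omega) (by omega))
        · rw [heqm]
          exact le_of_eq ((pvLastBin_eq_iff_dvd (by omega)).mpr h2).symm
      rw [pvSplitA_eq_BF (by omega) (by omega)]
      rw [pvLoopA, pvBF_last, if_neg (by omega)]
      rw [pvScanB, if_pos (by omega : minb ≤ maxb), if_pos hlast]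
      rw [pvBuild_eq_BF (by omega) (by omega)]

theorem compute_dynamic_bin_size_changed : Claim_changed_compute_dynamic_bin_size := by
  unfold Claim_changed_compute_dynamic_bin_size
  refine ⟨by decide, by decide, by decide, ?_, ?_, by decide⟩
  · show compute_dynamic_bin_size 40 none 20 30 = [40]
    unfold compute_dynamic_bin_size
    rw [if_neg (by norm_num), pvSplitA_eq_BF (by norm_num) (by norm_num)]
    rw [pvLoopD 40 20 30 (by norm_num) (by norm_num) (by decide) 9 30 (by norm_num) le_rfl]
    decide
  · show compute_dynamic_bin_size_alt 40 none 20 30 = [20, 20]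
    unfold compute_dynamic_bin_size_alt
    rw [if_neg (by norm_num)]
    rw [pvScanD 40 20 30 (by norm_num) (by norm_num) (by decide) (by decide) 10 30
      (by norm_num) le_rfl]
    decide

theorem compute_dynamic_bin_size_tight : Claim_exact_compute_dynamic_bin_size := by
  intro p name minb maxb hdom hpre hD
  obtain ⟨hple, hm2, hmm, hdvd, hall⟩ := hD
  have hallL : ∀ b', minb < b' → b' ≤ maxb → pvLastBin p b' < minb := by
    intro b' h1 h2
    have hm := hall b' ((PySem.List.mem_pyRange_one).mpr ⟨by omega, by omega⟩)
    rwa [pvD_lastBin (by omega)] at hm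
  have hp1 : 1 ≤ p := by omega
  have hgt : minb + 1 ≤ p := by
    by_contra hle2
    have hpm : p = minb := by omega
    have h := hallL (minb + 1) (by omega) (by omega)
    rw [pvLastBin_of_le (by omega) (by omega) (by omega)] at h
    omega
  have h2m : 2 * minb ≤ p := by
    obtain ⟨c, rfl⟩ := hdvd
    have hc2 : 2 ≤ c := by nlinarith
    nlinarith
  unfold compute_dynamic_bin_size compute_dynamic_bin_size_alt
  rw [if_neg (by omega), if_neg (by omega)]
  rw [pvSplitA_eq_BF (by omega) (by omega)]
  rw [pvLoopD p minb maxb (by omega) hm2 hallL ((maxb - minb - 1).toNat) maxb (by omega) le_rfl]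
  rw [pvScanD p minb maxb (by omega) hm2 hdvd hallL ((maxb - minb).toNat) maxb (by omega) le_rfl]
  rw [pvBuild_eq_BF (by omega) (by omega)]
  unfold pvBF
  have hK1 : 1 ≤ ((p - 1) / minb).toNat := by
    have := (Int.le_ediv_iff_mul_le (show (0:Int) < minb by omega)).mpr
      (show 1 * minb ≤ p - 1 by omega)
    omega
  rw [pvMergeA_BF hK1]
  intro heq
  have hlen := congrArg List.length heq
  simp at hlen
  omega
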